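-- pv_equiv track=rewrite | github.com/HeoYou/algorithm-python | 월간 코드 챌린지 시즌1 4번.py | solution
-- ===== SOURCE A (Python) =====
-- def solution(s):
--     answer = 0
--     maxN = 0
--     for i in range(len(s)):
--         maxN = 0
--         for j in range(i, len(s)):
--
--             if s[i] != s[j]:
--                 answer += j - i
--                 maxN = j - i
--             else:
--                 answer += maxN
--
--     return answer
-- ===== SOURCE B (Python) =====
-- def solution(s):
--     # O(n) single pass: for each j, closed-form contribution of all pairs (i, j)
--     # using per-character prefix counts/index-sums and the last differing index p.
--     answer = 0
--     stats = {}          # char -> (count of earlier occurrences, sum of their indices)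
--     p = -1              # largest index < j whose char differs from s[j]
--     for j, c in enumerate(s):
--         if j > 0 and s[j - 1] != c:
--             p = j - 1
--         k, sm = stats.get(c, (0, 0))
--         # pairs i < j with s[i] != c contribute (j - i) each
--         answer += j * (j - k) - (j * (j - 1) // 2 - sm)
--         # pairs i < j with s[i] == c contribute max(p - i, 0) each
--         if p >= 0:
--             run = j - 1 - p          # indices p+1..j-1 all carry char c
--             answer += p * (k - run) - (sm - run * (p + j) // 2)
--         stats[c] = (k + 1, sm + j)
--     return answer
-- ===== Notes on version B (the rewrite author's own statement) =====
-- stated objective: faster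
-- what changed: replaced the quadratic scan over all pairs (which carries a last-differing-distance accumulator per start index) by a single left-to-right pass that, for each end index j, adds a closed-form contribution computed from per-character prefix counts and index sums plus the last index differing from s[j]
import Mathlib
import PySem

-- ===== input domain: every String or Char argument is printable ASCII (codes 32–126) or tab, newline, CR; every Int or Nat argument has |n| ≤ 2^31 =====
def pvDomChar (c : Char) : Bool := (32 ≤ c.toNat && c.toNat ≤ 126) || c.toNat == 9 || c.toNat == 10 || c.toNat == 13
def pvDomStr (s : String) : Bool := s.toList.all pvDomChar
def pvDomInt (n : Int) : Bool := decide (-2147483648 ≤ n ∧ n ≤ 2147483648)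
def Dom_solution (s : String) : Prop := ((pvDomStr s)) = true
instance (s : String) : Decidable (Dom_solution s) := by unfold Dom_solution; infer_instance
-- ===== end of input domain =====

-- B replaces A's O(n^2) pair scan by one O(n) pass using per-character prefix counts /
-- index sums and the last differing index (objective: faster, asymptotic).

-- ===== PORT A =====
-- for i in range(len(s)): maxN = 0; for j in range(i, len(s)): if s[i] != s[j]: answer += j-i; maxN = j-i else: answer += maxN
def solution (s : String) : Int :=
  (((PySem.List.pyRange 0 (PySem.Str.len s) 1).foldl
    (fun (st : Int × Int) i =>
      (PySem.List.pyRange i (PySem.Str.len s) 1).foldl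
        (fun (st2 : Int × Int) j =>
          if PySem.Str.pyGet? s i ≠ PySem.Str.pyGet? s j then
            (st2.1 + (j - i), j - i)
          else
            (st2.1 + st2.2, st2.2))
        (st.1, 0))
    (0, 0)).1)

-- ===== PORT B =====
-- single pass over enumerate(s): state (answer, stats : char -> (count, index-sum), p)
def solution_alt (s : String) : Int :=
  (((PySem.List.enumerate s.toList 0).foldl
    (fun (st : Int × PySem.Dict Char (Int × Int) × Int) jc =>
      let j := jc.1
      let c := jc.2
      let p : Int :=
        if 0 < j ∧ PySem.Str.pyGet? s (j - 1) ≠ some c then j - 1 else st.2.2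
      let k := (st.2.1.getD c (0, 0)).1
      let sm := (st.2.1.getD c (0, 0)).2
      let a1 := st.1 + (j * (j - k) - (PySem.Int.floordiv (j * (j - 1)) 2 - sm))
      let a2 :=
        if 0 ≤ p then
          let run := j - 1 - p
          a1 + (p * (k - run) - (sm - PySem.Int.floordiv (run * (p + j)) 2))
        else a1
      (a2, st.2.1.insert c (k + 1, sm + j), p))
    (0, PySem.Dict.empty, -1)).1)

-- ===== PRECONDITION & SPEC =====
def Spec_solution (s : String) (out : Int) : Prop := out = solution_alt s
instance (s : String) (out : Int) : Decidable (Spec_solution s out) := by unfold Spec_solution; infer_instance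

-- ===== CLAIM (what is proved, stated in full; the proofs are below) =====
def Claim_equal_solution : Prop := ∀ (s : String), Dom_solution s → Spec_solution s (solution s)

-- ===== LEMMAS AND PROOFS =====

-- character at index k (all uses are in range, so the default never matters)
def pvCh (l : List Char) (k : Nat) : Char := l.getD k 'a'

-- last index in [i, j] whose character differs from l[i], or i if none
def pvM (l : List Char) (i : Nat) : Nat → Nat
  | 0 => i
  | j + 1 => if j + 1 ≤ i then i else if pvCh l (j + 1) = pvCh l i then pvM l i j else j + 1

-- B's running p: last index < j whose character differs from l[j], or -1
def pvP (l : List Char) : Nat → Int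
  | 0 => -1
  | j + 1 => if pvCh l j ≠ pvCh l (j + 1) then (j : Int) else pvP l j

-- per-char prefix count and prefix index-sum over the first t characters
def pvCnt (l : List Char) (c : Char) (t : Nat) : Int :=
  ∑ i ∈ Finset.range t, (if pvCh l i = c then (1 : Int) else 0)
def pvIdx (l : List Char) (c : Char) (t : Nat) : Int :=
  ∑ i ∈ Finset.range t, (if pvCh l i = c then (i : Int) else 0)

-- the value A's pair (i, j) contributes, in closed form
def pvD (l : List Char) (j i : Nat) : Int :=
  if pvCh l i ≠ pvCh l j then (j : Int) else pvP l j

-- column sum (all pairs ending at j)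
def pvT (l : List Char) (j : Nat) : Int :=
  ∑ i ∈ Finset.range (j + 1), max (pvD l j i - (i : Int)) 0

-- B's per-step closed-form addition at step j
def pvTb (l : List Char) (j : Nat) : Int :=
  (j * ((j : Int) - pvCnt l (pvCh l j) j)
      - (PySem.Int.floordiv ((j : Int) * ((j : Int) - 1)) 2 - pvIdx l (pvCh l j) j))
    + (if 0 ≤ pvP l j then
        (pvP l j) * (pvCnt l (pvCh l j) j - ((j : Int) - 1 - pvP l j))
          - (pvIdx l (pvCh l j) j
              - PySem.Int.floordiv ((((j : Int) - 1 - pvP l j)) * (pvP l j + j)) 2)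
      else 0)

theorem pvP_lt (l : List Char) (j : Nat) : pvP l j < (j : Int) := by
  induction j with
  | zero => simp [pvP]
  | succ j ih =>
    simp only [pvP]
    split <;> [push_cast; skip] <;> omega

theorem pvP_ge (l : List Char) (j : Nat) : -1 ≤ pvP l j := by
  induction j with
  | zero => simp [pvP]
  | succ j ih =>
    simp only [pvP]
    split <;> omega

theorem pvP_tail (l : List Char) (j k : Nat) (h1 : pvP l j < (k : Int)) (h2 : k < j) :
    pvCh l k = pvCh l j := by
  induction j with
  | zero => omega
  | succ j ih =>
    simp only [pvP] at h1
    split at h1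
    · omega
    · rename_i he
      rw [not_not] at he
      rcases Nat.lt_succ_iff_lt_or_eq.mp h2 with h | h
      · rw [ih h1 h, he]
      · subst h; exact he

theorem pvM_char (l : List Char) (i j : Nat) (h : i ≤ j) :
    ((pvM l i j : Int) - i) = max (pvD l j i - (i : Int)) 0 := by
  induction j with
  | zero =>
    have hi : i = 0 := Nat.le_zero.mp h
    subst hi
    simp [pvM, pvD, pvP]
  | succ j ih =>
    rcases eq_or_lt_of_le h with he | hlt
    · have h1 : pvM l i (j + 1) = i := by rw [he]; simp [pvM]
      have h2 : pvD l (j + 1) i = pvP l (j + 1) := by rw [pvD, he]; simp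
      have hp := pvP_lt l (j + 1)
      have hc : (i : Int) = (j : Int) + 1 := by exact_mod_cast he
      rw [h1, h2]
      omega
    · have hij : i ≤ j := Nat.lt_succ_iff.mp hlt
      have hM : pvM l i (j + 1)
          = if pvCh l (j + 1) = pvCh l i then pvM l i j else j + 1 := by
        simp only [pvM]
        rw [if_neg (by omega)]
      rw [hM]
      by_cases hc : pvCh l (j + 1) = pvCh l i
      · rw [if_pos hc]
        have h2 : pvD l (j + 1) i = pvP l (j + 1) := by
          rw [pvD, if_neg (by simp [hc])]
        rw [h2]
        simp only [pvP]
        by_cases hd : pvCh l j ≠ pvCh l (j + 1)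
        · rw [if_pos hd]
          have hD : pvD l j i = (j : Int) := by
            rw [pvD, if_pos (by rw [← hc]; exact fun hx => hd (Eq.symm hx))]
          exact (ih hij).trans (by rw [hD])
        · rw [if_neg hd]
          rw [not_not] at hd
          have hD : pvD l j i = pvP l j := by
            rw [pvD, if_neg (by rw [← hd] at hc; simp [← hc])]
          exact (ih hij).trans (by rw [hD])
      · rw [if_neg hc]
        have h2 : pvD l (j + 1) i = ((j : Int) + 1) := by
          rw [pvD, if_pos (fun hx => hc (Eq.symm hx))]
          push_cast
          ring
        rw [h2]
        have : (i : Int) ≤ (j : Int) + 1 := by exact_mod_cast Nat.le_of_lt hlt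
        push_cast
        omega

theorem pvGauss (n : Nat) : (∑ i ∈ Finset.range n, (i : Int)) * 2 = (n : Int) * ((n : Int) - 1) := by
  induction n with
  | zero => simp
  | succ n ih =>
    rw [Finset.sum_range_succ, add_mul, ih]
    push_cast
    ring

theorem pvT_eq_Tb (l : List Char) (j : Nat) : pvT l j = pvTb l j := by
  have hplt : pvP l j < (j : Int) := pvP_lt l j
  have hpge : -1 ≤ pvP l j := pvP_ge l j
  -- the i = j term is 0
  have h0 : pvT l j = ∑ i ∈ Finset.range j, max (pvD l j i - (i : Int)) 0 := by
    rw [pvT, Finset.sum_range_succ]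
    have hD : pvD l j j = pvP l j := by simp [pvD]
    rw [hD]
    have hz : max (pvP l j - (j : Int)) 0 = 0 := by omega
    rw [hz, add_zero]
  -- split each term by whether the character matches pvCh l j
  have h1 : ∀ i ∈ Finset.range j, max (pvD l j i - (i : Int)) 0
      = (if pvCh l i = pvCh l j then max (pvP l j - (i : Int)) 0 else 0)
        + (if pvCh l i = pvCh l j then 0 else (j : Int) - i) := by
    intro i hi
    have hij : i < j := Finset.mem_range.mp hi
    by_cases hcc : pvCh l i = pvCh l j
    · simp only [pvD, if_neg (show ¬ pvCh l i ≠ pvCh l j by simp [hcc]),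
        if_pos hcc]
      ring
    · simp only [pvD, if_pos hcc, if_neg hcc]
      have : (i : Int) < (j : Int) := by exact_mod_cast hij
      omega
  rw [h0, Finset.sum_congr rfl h1, Finset.sum_add_distrib]
  -- the different-character part
  have hTot := pvGauss j
  have hfd : PySem.Int.floordiv ((j : Int) * ((j : Int) - 1)) 2
      = ∑ i ∈ Finset.range j, (i : Int) := by
    rw [← hTot, PySem.Int.floordiv_eq_ediv_of_pos (by norm_num)]
    exact Int.mul_ediv_cancel _ (by norm_num)
  have hdiff : ∑ i ∈ Finset.range j, (if pvCh l i = pvCh l j then 0 else (j : Int) - i)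
      = (j : Int) * ((j : Int) - pvCnt l (pvCh l j) j)
        - (PySem.Int.floordiv ((j : Int) * ((j : Int) - 1)) 2 - pvIdx l (pvCh l j) j) := by
    have e1 : ∀ i ∈ Finset.range j,
        (if pvCh l i = pvCh l j then (0 : Int) else (j : Int) - i)
        = ((j : Int) - i)
          - ((j : Int) * (if pvCh l i = pvCh l j then (1 : Int) else 0)
              - (if pvCh l i = pvCh l j then (i : Int) else 0)) := by
      intro i _
      by_cases hcc : pvCh l i = pvCh l j <;> simp [hcc]
    rw [Finset.sum_congr rfl e1, Finset.sum_sub_distrib, Finset.sum_sub_distrib,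
      Finset.sum_sub_distrib, ← Finset.mul_sum, hfd, pvCnt, pvIdx, Finset.sum_const,
      Finset.card_range, nsmul_eq_mul]
    ring
  rw [hdiff]
  -- the same-character part
  by_cases hp0 : 0 ≤ pvP l j
  · -- pvP l j = last differing index; all of (pvP l j, j) carries pvCh l j
    have hpn : (((pvP l j).toNat : Int)) = pvP l j := Int.toNat_of_nonneg hp0
    have hpnj : (pvP l j).toNat < j := by omega
    have htail : ∀ i, (pvP l j).toNat < i → i < j → pvCh l i = pvCh l j := by
      intro i hi1 hi2
      exact pvP_tail l j i (by omega) hi2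
    have hsplit : ∀ g : Nat → Int, ∑ i ∈ Finset.range j, g i
        = (∑ i ∈ Finset.range ((pvP l j).toNat + 1), g i)
          + ∑ i ∈ Finset.Ico ((pvP l j).toNat + 1) j, g i := by
      intro g
      rw [Finset.range_eq_Ico]
      exact (Finset.sum_Ico_consecutive _ (by omega : 0 ≤ (pvP l j).toNat + 1)
        (by omega : (pvP l j).toNat + 1 ≤ j)).symm
    -- tail of the max-sum vanishes
    have htail0 : ∑ i ∈ Finset.Ico ((pvP l j).toNat + 1) j,
        (if pvCh l i = pvCh l j then max (pvP l j - (i : Int)) 0 else 0) = 0 := by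
      refine Finset.sum_eq_zero fun i hi => ?_
      have hi' := Finset.mem_Ico.mp hi
      have hmx : max (pvP l j - (i : Int)) 0 = 0 := by
        have : (pvP l j).toNat < i := by omega
        have : ((pvP l j).toNat : Int) < (i : Int) := by exact_mod_cast this
        omega
      by_cases hcc : pvCh l i = pvCh l j <;> simp [hcc, hmx]
    -- head of the max-sum is linear
    have hhead : ∑ i ∈ Finset.range ((pvP l j).toNat + 1),
        (if pvCh l i = pvCh l j then max (pvP l j - (i : Int)) 0 else 0)
        = pvP l j * pvCnt l (pvCh l j) ((pvP l j).toNat + 1)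
            - pvIdx l (pvCh l j) ((pvP l j).toNat + 1) := by
      have e2 : ∀ i ∈ Finset.range ((pvP l j).toNat + 1),
          (if pvCh l i = pvCh l j then max (pvP l j - (i : Int)) 0 else 0)
          = pvP l j * (if pvCh l i = pvCh l j then (1 : Int) else 0)
              - (if pvCh l i = pvCh l j then (i : Int) else 0) := by
        intro i hi
        have hi' : i ≤ (pvP l j).toNat := by
          have := Finset.mem_range.mp hi
          omega
        have hmx : max (pvP l j - (i : Int)) 0 = pvP l j - (i : Int) := by
          have : (i : Int) ≤ ((pvP l j).toNat : Int) := by exact_mod_cast hi'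
          omega
        by_cases hcc : pvCh l i = pvCh l j <;> simp [hcc, hmx]
      rw [Finset.sum_congr rfl e2, Finset.sum_sub_distrib, ← Finset.mul_sum, pvCnt, pvIdx]
    -- prefix counts at j versus at toNat (pvP l j) + 1
    have hKsplit : pvCnt l (pvCh l j) j
        = pvCnt l (pvCh l j) ((pvP l j).toNat + 1) + ((j : Int) - ((pvP l j).toNat + 1)) := by
      rw [pvCnt, hsplit, ← pvCnt]
      have hc1 : ∑ i ∈ Finset.Ico ((pvP l j).toNat + 1) j,
          (if pvCh l i = pvCh l j then (1 : Int) else 0)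
          = ((j : Int) - ((pvP l j).toNat + 1)) := by
        rw [Finset.sum_congr rfl fun i hi => if_pos
          (htail i (Finset.mem_Ico.mp hi).1 (Finset.mem_Ico.mp hi).2)]
        rw [Finset.sum_const, Nat.card_Ico, nsmul_eq_mul, mul_one]
        push_cast [Nat.cast_sub (by omega : (pvP l j).toNat + 1 ≤ j)]
        ring
      rw [hc1]
    have hSsplit : pvIdx l (pvCh l j) j
        = pvIdx l (pvCh l j) ((pvP l j).toNat + 1)
          + ∑ i ∈ Finset.Ico ((pvP l j).toNat + 1) j, (i : Int) := by
      rw [pvIdx, hsplit, ← pvIdx]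
      congr 1
      exact Finset.sum_congr rfl fun i hi => if_pos
        (htail i (Finset.mem_Ico.mp hi).1 (Finset.mem_Ico.mp hi).2)
    -- the run's index sum in closed form
    have hS2 : PySem.Int.floordiv (((j : Int) - 1 - pvP l j) * (pvP l j + (j : Int))) 2
        = ∑ i ∈ Finset.Ico ((pvP l j).toNat + 1) j, (i : Int) := by
      have hsub : ∑ i ∈ Finset.Ico ((pvP l j).toNat + 1) j, (i : Int)
          = (∑ i ∈ Finset.range j, (i : Int))
            - ∑ i ∈ Finset.range ((pvP l j).toNat + 1), (i : Int) := by
        exact Finset.sum_Ico_eq_sub _ (by omega)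
      have h2 : (∑ i ∈ Finset.Ico ((pvP l j).toNat + 1) j, (i : Int)) * 2
          = ((j : Int) - 1 - pvP l j) * (pvP l j + (j : Int)) := by
        rw [hsub, sub_mul, pvGauss, pvGauss]
        push_cast [hpn]
        ring
      rw [← h2, PySem.Int.floordiv_eq_ediv_of_pos (by norm_num)]
      exact Int.mul_ediv_cancel _ (by norm_num)
    rw [hsplit, htail0, add_zero, hhead, pvTb, if_pos hp0, hS2, hKsplit, hSsplit]
    push_cast [hpn]
    ring
  · -- no differing index before j: the same-character part vanishes
    have hsame0 : ∑ i ∈ Finset.range j,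
        (if pvCh l i = pvCh l j then max (pvP l j - (i : Int)) 0 else 0) = 0 := by
      refine Finset.sum_eq_zero fun i hi => ?_
      have hmx : max (pvP l j - (i : Int)) 0 = 0 := by
        have : (0 : Int) ≤ (i : Int) := by positivity
        omega
      by_cases hcc : pvCh l i = pvCh l j <;> simp [hcc, hmx]
    rw [hsame0, pvTb, if_neg hp0, add_zero, zero_add]

-- A's inner loop
theorem pvM_step (l : List Char) (i t : Nat) (hit : i ≤ t) :
    pvM l i t = if i = t then i
      else (if pvCh l t = pvCh l i then pvM l i (t - 1) else t) := by
  cases t with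
  | zero =>
    have h0 : i = 0 := Nat.le_zero.mp hit
    simp [h0, pvM]
  | succ t =>
    simp only [pvM, Nat.add_sub_cancel]
    by_cases he : i = t + 1
    · rw [if_pos (by omega), if_pos he]
    · rw [if_neg (by omega), if_neg he]

theorem pvGet_ch (l : List Char) (s : String) (hs : s.toList = l) (k : Nat)
    (hk : k < l.length) : PySem.Str.pyGet? s (k : Int) = some (pvCh l k) := by
  rw [PySem.Str.pyGet?_natCast, hs, List.getElem?_eq_getElem hk, pvCh,
    List.getD_eq_getElem l 'a' hk]

theorem pvA_inner (l : List Char) (s : String) (hs : s.toList = l) (i : Nat)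
    (hi : i < l.length) (t : Nat) (h1 : i ≤ t) (h2 : t ≤ l.length) (a : Int) :
    (PySem.List.pyRange (i : Int) (t : Int) 1).foldl
        (fun (st2 : Int × Int) j =>
          if PySem.Str.pyGet? s (i : Int) ≠ PySem.Str.pyGet? s j then
            (st2.1 + (j - (i : Int)), j - (i : Int))
          else
            (st2.1 + st2.2, st2.2))
        (a, 0)
      = (a + ∑ j ∈ Finset.Ico i t, ((pvM l i j : Int) - i),
          if i < t then (pvM l i (t - 1) : Int) - i else 0) := by
  induction t with
  | zero =>
    have h0 : i = 0 := Nat.le_zero.mp h1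
    simp [h0]
  | succ t ih =>
    by_cases he : i = t + 1
    · rw [he, PySem.List.pyRange_one_eq_nil (le_refl _)]
      simp
    · have hit : i ≤ t := by omega
      have htl : t < l.length := by omega
      have hcast : ((t : Int) + 1) = ((t + 1 : Nat) : Int) := by push_cast; ring
      rw [← hcast, PySem.List.pyRange_one_succ_right (by exact_mod_cast hit),
        List.foldl_append, ih hit (by omega)]
      simp only [List.foldl_cons, List.foldl_nil]
      rw [pvGet_ch l s hs i hi, pvGet_ch l s hs t htl]
      have hsum : ∑ j ∈ Finset.Ico i (t + 1), ((pvM l i j : Int) - i)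
          = (∑ j ∈ Finset.Ico i t, ((pvM l i j : Int) - i)) + ((pvM l i t : Int) - i) :=
        Finset.sum_Ico_succ_top hit _
      by_cases hc : pvCh l i = pvCh l t
      · rw [if_neg (by simp [hc])]
        have hMt : pvM l i t = if i < t then pvM l i (t - 1) else i := by
          rw [pvM_step l i t hit]
          by_cases hie : i = t
          · rw [if_pos hie, if_neg (by omega)]
          · rw [if_neg hie, if_pos hc.symm, if_pos (by omega)]
        have hm : (if i < t then (pvM l i (t - 1) : Int) - i else 0)
            = (pvM l i t : Int) - i := by
          rw [hMt]
          by_cases hlt : i < t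
          · rw [if_pos hlt, if_pos hlt]
          · rw [if_neg hlt, if_neg hlt]
            simp
        rw [hsum, if_pos (show i < t + 1 by omega), Nat.add_sub_cancel, hm, add_assoc]
      · rw [if_pos (by simp [hc])]
        have hne : i ≠ t := fun hx => hc (by rw [hx])
        have hMt : pvM l i t = t := by
          rw [pvM_step l i t hit, if_neg hne, if_neg (fun hx => hc hx.symm)]
        rw [hsum, if_pos (show i < t + 1 by omega), Nat.add_sub_cancel, hMt, add_assoc]

theorem pvA_total (s : String) :
    solution s
      = ∑ i ∈ Finset.range s.toList.length,
          ∑ j ∈ Finset.Ico i s.toList.length, ((pvM s.toList i j : Int) - i) := by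
  unfold solution
  rw [PySem.Str.len_eq]
  generalize hl : s.toList = l
  have main : ∀ t : Nat, t ≤ l.length →
      ((PySem.List.pyRange 0 (t : Int) 1).foldl
        (fun (st : Int × Int) i =>
          (PySem.List.pyRange i (l.length : Int) 1).foldl
            (fun (st2 : Int × Int) j =>
              if PySem.Str.pyGet? s i ≠ PySem.Str.pyGet? s j then
                (st2.1 + (j - i), j - i)
              else
                (st2.1 + st2.2, st2.2))
            (st.1, 0))
        (0, 0)).1
      = ∑ i ∈ Finset.range t, ∑ j ∈ Finset.Ico i l.length, ((pvM l i j : Int) - i) := by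
    intro t
    induction t with
    | zero => intro _; simp
    | succ t ih =>
      intro ht
      have hcast : ((t : Int) + 1) = ((t + 1 : Nat) : Int) := by push_cast; ring
      rw [← hcast, PySem.List.pyRange_one_succ_right (by positivity), List.foldl_append]
      simp only [List.foldl_cons, List.foldl_nil]
      rw [pvA_inner l s hl t (by omega) l.length (by omega) (le_refl _) _]
      rw [Finset.sum_range_succ, ← ih (by omega)]
  exact main l.length (le_refl _)

-- the p stored in B's state after t steps
def pvPS (l : List Char) : Nat → Int
  | 0 => -1
  | t + 1 => pvP l t

theorem pvPS_step (l : List Char) (s : String) (hs : s.toList = l) (t : Nat)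
    (ht : t < l.length) :
    (if 0 < (t : Int) ∧ PySem.Str.pyGet? s ((t : Int) - 1) ≠ some (pvCh l t) then (t : Int) - 1
      else pvPS l t) = pvP l t := by
  cases t with
  | zero =>
    rw [if_neg (by simp)]
    rfl
  | succ u =>
    have hcast : ((u + 1 : Nat) : Int) - 1 = ((u : Nat) : Int) := by push_cast; ring
    rw [hcast, pvGet_ch l s hs u (by omega)]
    simp only [pvPS, pvP]
    by_cases hd : pvCh l u ≠ pvCh l (u + 1)
    · rw [if_pos ⟨by positivity, by simpa using hd⟩, if_pos hd]
    · rw [not_not] at hd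
      rw [if_neg (by simp [hd]), if_neg (by simp [hd])]

theorem pvCnt_succ (l : List Char) (c : Char) (t : Nat) :
    pvCnt l c (t + 1) = pvCnt l c t + (if pvCh l t = c then 1 else 0) :=
  Finset.sum_range_succ _ t

theorem pvIdx_succ (l : List Char) (c : Char) (t : Nat) :
    pvIdx l c (t + 1) = pvIdx l c t + (if pvCh l t = c then (t : Int) else 0) :=
  Finset.sum_range_succ _ t

theorem pvB_total (s : String) :
    solution_alt s = ∑ j ∈ Finset.range s.toList.length, pvTb s.toList j := by
  unfold solution_alt
  generalize hl : s.toList = l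
  rw [PySem.List.enumerate_eq_map_pyRange l 'a', List.foldl_map, PySem.List.len_eq]
  have main : ∀ t : Nat, t ≤ l.length →
      ∃ d : PySem.Dict Char (Int × Int),
        (∀ c, d.getD c (0, 0) = (pvCnt l c t, pvIdx l c t)) ∧
        (PySem.List.pyRange 0 (t : Int) 1).foldl
          (fun (st : Int × PySem.Dict Char (Int × Int) × Int) j' =>
            (fun (st : Int × PySem.Dict Char (Int × Int) × Int)
                 (jc : Int × Char) =>
              let j := jc.1
              let c := jc.2
              let p : Int :=
                if 0 < j ∧ PySem.Str.pyGet? s (j - 1) ≠ some c then j - 1 else st.2.2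
              let k := (st.2.1.getD c (0, 0)).1
              let sm := (st.2.1.getD c (0, 0)).2
              let a1 := st.1 + (j * (j - k) - (PySem.Int.floordiv (j * (j - 1)) 2 - sm))
              let a2 :=
                if 0 ≤ p then
                  let run := j - 1 - p
                  a1 + (p * (k - run) - (sm - PySem.Int.floordiv (run * (p + j)) 2))
                else a1
              (a2, st.2.1.insert c (k + 1, sm + j), p))
              st (j', PySem.List.pyGetD l j' 'a'))
          (0, PySem.Dict.empty, -1)
        = (∑ j ∈ Finset.range t, pvTb l j, d, pvPS l t) := by
    intro t
    induction t with
    | zero =>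
      intro _
      refine ⟨PySem.Dict.empty, fun c => ?_, ?_⟩
      · simp [pvCnt, pvIdx]
      · simp [pvPS]
    | succ t ih =>
      intro ht
      obtain ⟨d, hd, hfold⟩ := ih (by omega)
      have hcast : ((t : Int) + 1) = ((t + 1 : Nat) : Int) := by push_cast; ring
      rw [← hcast, PySem.List.pyRange_one_succ_right (by positivity), List.foldl_append,
        hfold]
      simp only [List.foldl_cons, List.foldl_nil]
      refine ⟨d.insert (pvCh l t) ((pvCnt l (pvCh l t) t) + 1, pvIdx l (pvCh l t) t + t),
        fun c => ?_, ?_⟩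
      · rw [PySem.Dict.getD_insert]
        by_cases hcc : c = pvCh l t
        · subst hcc
          rw [if_pos rfl, pvCnt_succ, pvIdx_succ, if_pos rfl, if_pos rfl]
        · rw [if_neg hcc, hd c, pvCnt_succ, pvIdx_succ,
            if_neg (fun hx => hcc hx.symm), if_neg (fun hx => hcc hx.symm), add_zero,
            add_zero]
      · dsimp only
        have hgl : PySem.List.pyGetD l (t : Int) 'a' = pvCh l t := by
          rw [PySem.List.pyGetD_natCast]
          rfl
        rw [hgl, pvPS_step l s hl t (by omega), hd (pvCh l t)]
        have hps : pvPS l (t + 1) = pvP l t := rfl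
        rw [hps, Finset.sum_range_succ, pvTb]
        by_cases hp : 0 ≤ pvP l t
        · rw [if_pos hp, if_pos hp]
          refine Prod.ext ?_ rfl
          dsimp only
          ring
        · rw [if_neg hp, if_neg hp]
          refine Prod.ext ?_ rfl
          dsimp only
          ring
  obtain ⟨d, _, hfold⟩ := main l.length (le_refl _)
  rw [hfold]

-- ===== VERDICT (by name: the statement is the Claim_ definition above) =====
theorem solution_spec : Claim_equal_solution := by
  intro s _
  unfold Spec_solution
  rw [pvA_total, pvB_total]
  have h1 : ∀ i ∈ Finset.range s.toList.length,
      ∑ j ∈ Finset.Ico i s.toList.length, ((pvM s.toList i j : Int) - i)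
        = ∑ j ∈ Finset.Ico i s.toList.length, max (pvD s.toList j i - (i : Int)) 0 := by
    intro i _
    refine Finset.sum_congr rfl fun j hj => ?_
    exact pvM_char s.toList i j (Finset.mem_Ico.mp hj).1
  rw [Finset.sum_congr rfl h1]
  have := Finset.sum_Ico_Ico_comm 0 s.toList.length
      (fun i j => max (pvD s.toList j i - (i : Int)) 0)
  simp only [Finset.range_eq_Ico]
  rw [this]
  refine Finset.sum_congr rfl fun j hj => ?_
  rw [← pvT_eq_Tb s.toList j]
  unfold pvT
  rw [Finset.range_eq_Ico]
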